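-- pv_equiv track=rewrite | github.com/anthonyrota/ProgComp | goonerism_spenerator/__main__.py | transform
-- ===== SOURCE A (Python) =====
-- def is_trivial(word):
--     return len(word) <= 2 or word[0] in 'aeiou' or word in ["for", "has", "have", "she", "that", "the", "this", "will", "with"]
--
-- def get_prefix_len(word):
--     if word[:2] == 'qu':
--         return 2
--
--     return next(i for i, l in enumerate(word) if l in 'aeiou')
--
-- def transform(phrase):
--     split = phrase.split(' ')
--     new_phrase = split.copy()
--     special_word_idxs = []
--     for i, word in enumerate(split):
--         if not is_trivial(word):
--             special_word_idxs.append(i)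
--     if len(special_word_idxs) < 2:
--         return phrase
--     for i, idx in enumerate(special_word_idxs):
--         j = special_word_idxs[(i-1+len(special_word_idxs)) %
--                               len(special_word_idxs)]
--         p1l = get_prefix_len(split[idx])
--         p2l = get_prefix_len(split[j])
--         new_phrase[idx] = split[j][:p2l] + split[idx][p1l:]
--     return ' '.join(new_phrase)
-- ===== SOURCE B (Python) =====
-- def is_trivial(word):
--     return len(word) <= 2 or word[0] in 'aeiou' or word in ["for", "has", "have", "she", "that", "the", "this", "will", "with"]
--
-- def get_prefix_len(word):
--     if word[:2] == 'qu':
--         return 2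
--
--     return next(i for i, l in enumerate(word) if l in 'aeiou')
--
-- def transform(phrase):
--     # Single streaming pass that CARRIES the previous special word's prefix as an
--     # accumulator (no index list, no modular index arithmetic); the first special
--     # word is emitted as-is and patched at the end with the final carried prefix.
--     words = phrase.split(' ')
--     if sum(1 for w in words if not is_trivial(w)) < 2:
--         return phrase
--     out = []
--     carried = None      # prefix of the most recent special word seen
--     first_pos = None    # position in out of the first special word
--     first_stem = None
--     for w in words:
--         if is_trivial(w):
--             out.append(w)
--         else:
--             p = get_prefix_len(w)
--             if carried is None:
--                 first_pos = len(out)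
--                 first_stem = w[p:]
--                 out.append(w)
--             else:
--                 out.append(carried + w[p:])
--             carried = w[:p]
--     out[first_pos] = carried + first_stem
--     return ' '.join(out)
-- ===== Notes on version B (the rewrite author's own statement) =====
-- stated objective: alternative
-- what changed: B replaces A's collect-special-indices-then-rewrite-by-cyclic-index-arithmetic scheme with a single streaming pass that carries the previous special word's prefix as an accumulator and patches the first special word at the end with the last carried prefix; no index list or modular indexing is used.
import Mathlib
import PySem

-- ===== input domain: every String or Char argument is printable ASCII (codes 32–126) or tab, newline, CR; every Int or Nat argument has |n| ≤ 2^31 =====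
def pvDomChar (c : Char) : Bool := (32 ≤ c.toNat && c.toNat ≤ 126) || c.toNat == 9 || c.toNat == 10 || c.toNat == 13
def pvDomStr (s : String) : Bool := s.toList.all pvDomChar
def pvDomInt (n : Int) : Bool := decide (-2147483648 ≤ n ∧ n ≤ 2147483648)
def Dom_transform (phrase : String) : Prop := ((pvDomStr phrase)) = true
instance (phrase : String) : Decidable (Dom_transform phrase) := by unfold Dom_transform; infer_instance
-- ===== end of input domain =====

-- B replaces A's special-index list + cyclic modular index arithmetic with one streaming pass carrying the previous special prefix, patching the first special word at the end (alternative decomposition, same cost).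


-- ===== PORT A =====
def pvVowels : List Char := ['a', 'e', 'i', 'o', 'u']

-- is_trivial(word)
def isTrivial (w : String) : Bool :=
  decide (PySem.Str.len w ≤ 2) ||
  (match w.toList with | [] => false | c :: _ => decide (c ∈ pvVowels)) ||
  decide (w ∈ ["for", "has", "have", "she", "that", "the", "this", "will", "with"])

-- get_prefix_len(word); the 'next(...)' raises StopIteration when the word has no vowel
-- (and no 'qu' prefix): those inputs are excluded by Pre_transform; there findIdx's
-- default (the word's length) stands in for the missing value.
def gplN (w : String) : Nat :=
  if w.toList.take 2 = ['q', 'u'] then 2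
  else w.toList.findIdx (fun c => c ∈ pvVowels)

def transform (phrase : String) : String :=
  let split := (PySem.Str.split? phrase " ").getD []  -- sep " " ≠ "" so split? is always some
  let specialIdxs := ((PySem.List.enumerate split).filter (fun p => ! isTrivial p.2)).map (·.1)
  if specialIdxs.length < 2 then phrase
  else
    let n : Int := specialIdxs.length
    let newPhrase := (PySem.List.enumerate specialIdxs).foldl
      (fun acc p =>
        let i := p.1
        let idx := p.2
        let j := specialIdxs.getD (PySem.Int.mod (i - 1 + n) n).toNat 0  -- index provably in [0,n)
        let wIdx := split.getD idx.toNat ""  -- idx comes from enumerate: nonneg, in range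
        let wJ := split.getD j.toNat ""
        let p1l := gplN wIdx
        let p2l := gplN wJ
        acc.set idx.toNat (String.ofList (wJ.toList.take p2l ++ wIdx.toList.drop p1l)))
      split
    PySem.Str.join " " newPhrase

-- ===== PORT B =====
-- one streaming pass; state = (out, carried prefix of last special seen, position of first special in out, stem of first special)
def transform_alt (phrase : String) : String :=
  let words := (PySem.Str.split? phrase " ").getD []  -- sep " " ≠ "" so split? is always some
  if words.foldl (fun (c : Int) w => if ! isTrivial w then c + 1 else c) 0 < 2 then phrase
  else
    let fin := words.foldl
      (fun (s : List String × Option (List Char) × Option Nat × List Char) w =>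
        if isTrivial w then (s.1 ++ [w], s.2)
        else
          let p := gplN w
          match s.2.1 with
          | none => (s.1 ++ [w], some (w.toList.take p), some s.1.length, w.toList.drop p)
          | some carried =>
              (s.1 ++ [String.ofList (carried ++ w.toList.drop p)],
               some (w.toList.take p), s.2.2.1, s.2.2.2))
      ([], none, none, [])
    match fin.2.1, fin.2.2.1 with
    | some carried, some fp =>
        PySem.Str.join " " (fin.1.set fp (String.ofList (carried ++ fin.2.2.2)))
    | _, _ => phrase  -- unreachable: the guard guarantees at least two special words

-- ===== PRECONDITION & SPEC =====
-- Pre_ excludes exactly the phrases on which Python A raises StopIteration (it returns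
-- nothing there): at least two non-trivial words and some non-trivial word without a
-- lowercase vowel and without a 'qu' prefix.  B raises identically there.
def Pre_transform (phrase : String) : Prop :=
  let ws := (PySem.Str.split? phrase " ").getD []
  let sp := ws.filter (fun w => ! isTrivial w)
  sp.length < 2 ∨ ∀ w ∈ sp, w.toList.take 2 = ['q', 'u'] ∨ w.toList.any (fun c => c ∈ pvVowels) = true
instance (phrase : String) : Decidable (Pre_transform phrase) := by
  unfold Pre_transform; infer_instance
def pvWitness_transform : String := "hello world"

def Spec_transform (phrase : String) (out : String) : Prop := out = transform_alt phrase
instance (phrase : String) (out : String) : Decidable (Spec_transform phrase out) := by unfold Spec_transform; infer_instance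

-- ===== CLAIM (what is proved, stated in full; the proofs are below) =====
def Claim_equal_transform : Prop := ∀ (phrase : String), Dom_transform phrase → Pre_transform phrase → Spec_transform phrase (transform phrase)

-- ===== LEMMAS AND PROOFS =====

def pref (w : String) : List Char := w.toList.take (gplN w)
def stemC (w : String) : List Char := w.toList.drop (gplN w)

-- rewrite pass: thread the prefix of the most recent special word through the list
def rew (pp : List Char) : List String → List String
  | [] => []
  | w :: ws =>
      if isTrivial w then w :: rew pp ws
      else String.ofList (pp ++ stemC w) :: rew (pref w) ws

-- prefix of the last special word of the list (pp if none)
def lastPref (pp : List Char) (ws : List String) : List Char :=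
  ws.foldl (fun q w => if isTrivial w then q else pref w) pp

theorem lastPref_append (pp : List Char) (t u : List String) :
    lastPref pp (t ++ u) = lastPref (lastPref pp t) u := List.foldl_append

theorem lastPref_trivial (pp : List Char) (t : List String)
    (h : ∀ w ∈ t, isTrivial w = true) : lastPref pp t = pp := by
  induction t with
  | nil => rfl
  | cons w t ih =>
      have hw := h w (by simp)
      simp only [lastPref, List.foldl_cons, hw]
      exact ih (fun u hu => h u (by simp [hu]))

theorem rew_trivial_append (pp : List Char) (t u : List String)
    (h : ∀ w ∈ t, isTrivial w = true) : rew pp (t ++ u) = t ++ rew pp u := by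
  induction t with
  | nil => rfl
  | cons w t ih =>
      have hw := h w (by simp)
      simp only [List.cons_append, rew, hw]
      exact congrArg _ (ih (fun v hv => h v (by simp [hv])))

theorem length_rew (pp : List Char) (ws : List String) : (rew pp ws).length = ws.length := by
  induction ws generalizing pp with
  | nil => rfl
  | cons w ws ih => simp only [rew]; split <;> simp [ih]

theorem rew_getElem (pp : List Char) (ws : List String) (k : Nat) (hk : k < ws.length) :
    (rew pp ws)[k]'(by rw [length_rew]; exact hk) =
      if isTrivial ws[k] then ws[k]
      else String.ofList (lastPref pp (ws.take k) ++ stemC ws[k]) := by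
  induction ws generalizing pp k with
  | nil => simp at hk
  | cons w ws ih =>
      cases k with
      | zero =>
          simp only [rew, List.take_zero, lastPref, List.foldl_nil, List.getElem_cons_zero]
          split <;> simp_all
      | succ k =>
          have hk' : k < ws.length := by simpa using hk
          simp only [rew, List.getElem_cons_succ, List.take_succ_cons]
          by_cases hw : isTrivial w
          · simp only [if_pos hw, List.getElem_cons_succ, ih pp k hk']
            simp [lastPref, hw]
          · simp only [if_neg hw, List.getElem_cons_succ, ih (pref w) k hk']
            simp [lastPref, hw]

-- ===== generic fold-of-sets characterization =====

theorem foldl_set_length {α β : Type} (l : List β) (idx : β → Nat) (val : β → α) (a : List α) :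
    (l.foldl (fun acc p => acc.set (idx p) (val p)) a).length = a.length := by
  induction l generalizing a with
  | nil => rfl
  | cons q l ih => simp [List.foldl_cons, ih, List.length_set]

theorem foldl_set_untouched {α β : Type} (l : List β) (idx : β → Nat) (val : β → α)
    (a : List α) (k : Nat) (h : ∀ p ∈ l, idx p ≠ k) :
    (l.foldl (fun acc p => acc.set (idx p) (val p)) a)[k]? = a[k]? := by
  induction l generalizing a with
  | nil => rfl
  | cons q l ih =>
      rw [List.foldl_cons, ih _ (fun p hp => h p (by simp [hp]))]
      exact List.getElem?_set_ne (h q (by simp))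

theorem foldl_set_hit {α β : Type} (l : List β) (idx : β → Nat) (val : β → α)
    (a : List α) (p : β) (hp : p ∈ l) (hnd : (l.map idx).Nodup)
    (hlt : idx p < a.length) :
    (l.foldl (fun acc p => acc.set (idx p) (val p)) a)[idx p]? = some (val p) := by
  induction l generalizing a with
  | nil => simp at hp
  | cons q l ih =>
      rw [List.foldl_cons]
      rcases List.mem_cons.1 hp with rfl | hp'
      · rw [foldl_set_untouched]
        · exact List.getElem?_set_self hlt
        · intro r hr
          have := (List.nodup_cons.1 hnd).1
          intro he; exact this (he ▸ List.mem_map_of_mem hr)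
      · exact ih _ hp' (List.nodup_cons.1 hnd).2 (by simpa using hlt)


-- ===== spN: the positions of the special (non-trivial) words =====

def spN (ws : List String) : List Nat :=
  (List.range ws.length).filter (fun k => ! isTrivial (ws.getD k ""))

theorem mem_spN (ws : List String) (k : Nat) :
    k ∈ spN ws ↔ k < ws.length ∧ isTrivial (ws.getD k "") = false := by
  simp [spN, List.mem_filter]

theorem pairwise_spN (ws : List String) : (spN ws).Pairwise (· < ·) :=
  List.Pairwise.filter _ List.pairwise_lt_range

theorem nodup_spN (ws : List String) : (spN ws).Nodup :=
  (pairwise_spN ws).imp (fun h => Nat.ne_of_lt h)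

theorem spN_lt (ws : List String) {i j : Nat} (hij : i < j) (hj : j < (spN ws).length) :
    (spN ws)[i]'(by omega) < (spN ws)[j] :=
  List.pairwise_iff_getElem.1 (pairwise_spN ws) i j (by omega) hj hij

theorem spN_index_lt (ws : List String) {i j : Nat} (hi : i < (spN ws).length)
    (hj : j < (spN ws).length) (h : (spN ws)[i] < (spN ws)[j]) : i < j := by
  by_contra hc
  rcases Nat.lt_or_ge j i with hji | hji
  · exact absurd (spN_lt ws hji hi) (by omega)
  · have : i = j := by omega
    subst this; omega

theorem spN_mem_index (ws : List String) {m : Nat} (hm : m ∈ spN ws) :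
    ∃ j, ∃ hj : j < (spN ws).length, (spN ws)[j] = m :=
  List.mem_iff_getElem.1 hm

-- structural unfolding of spN
theorem spN_cons (w : String) (ws : List String) :
    spN (w :: ws) = if isTrivial w then (spN ws).map (· + 1) else 0 :: (spN ws).map (· + 1) := by
  simp only [spN, List.length_cons, List.range_succ_eq_map, List.filter_cons, List.filter_map]
  by_cases hw : isTrivial w <;>
    simp [hw, Function.comp_def, Nat.succ_eq_add_one]

def spZ (ws : List String) : List Int := List.map (fun k : Nat => (k : Int)) (spN ws)

-- the A-side index list equals spN cast to Int
theorem spA_eq_gen (ws : List String) : ∀ s : Int,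
    ((PySem.List.enumerate ws s).filter (fun p => ! isTrivial p.2)).map (·.1)
      = List.map (fun k : Nat => s + (k : Int)) (spN ws) := by
  induction ws with
  | nil => intro s; simp [PySem.List.enumerate_nil, spN]
  | cons w ws ih =>
      intro s
      rw [PySem.List.enumerate_cons, List.filter_cons, spN_cons]
      by_cases hw : isTrivial w
      · rw [if_neg (by simp [hw]), if_pos hw, ih (s + 1), List.map_map]
        apply List.map_congr_left
        intro k _
        simp only [Function.comp_apply]
        push_cast
        ring
      · rw [if_pos (by simp [hw]), if_neg (by simp [hw])]
        simp only [List.map_cons]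
        rw [ih (s + 1)]
        simp only [List.map_map]
        refine congrArg₂ _ (by simp) ?_
        apply List.map_congr_left
        intro k _
        simp only [Function.comp_apply]
        push_cast
        ring

theorem spA_eq (ws : List String) :
    ((PySem.List.enumerate ws 0).filter (fun p => ! isTrivial p.2)).map (·.1) = spZ ws := by
  rw [spA_eq_gen ws 0, spZ]
  apply List.map_congr_left
  intro k _
  omega

theorem length_spN (ws : List String) :
    (spN ws).length = ws.countP (fun w => ! isTrivial w) := by
  induction ws with
  | nil => simp [spN]
  | cons w ws ih =>
      rw [spN_cons, List.countP_cons]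
      by_cases hw : isTrivial w <;> simp [hw, ih]

-- ===== lastPref over the special positions =====

theorem lastPref_take_first (ws : List String) (pp : List Char) (h0 : 0 < (spN ws).length) :
    lastPref pp (ws.take ((spN ws)[0])) = pp := by
  apply lastPref_trivial
  intro w hw
  rcases List.mem_iff_getElem.1 hw with ⟨m, hm, rfl⟩
  rw [List.getElem_take]
  by_contra hnt
  have hmlt : m < (spN ws)[0] := by
    have := hm; rw [List.length_take] at this; omega
  have hmem : m ∈ spN ws := by
    rw [mem_spN]
    have hml : m < ws.length := by
      have := hm; rw [List.length_take] at this; omega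
    refine ⟨hml, ?_⟩
    rw [List.getD_eq_getElem ws "" hml]
    simpa using hnt
  rcases spN_mem_index ws hmem with ⟨j, hj, hjm⟩
  have : j < 0 := spN_index_lt ws hj h0 (by omega)
  omega

theorem lastPref_take_succ (ws : List String) (pp : List Char) (i : Nat)
    (hi : i + 1 < (spN ws).length) :
    lastPref pp (ws.take ((spN ws)[i + 1])) = pref (ws.getD ((spN ws)[i]'(by omega)) "") := by
  have ha : (spN ws)[i]'(by omega) ∈ spN ws := List.getElem_mem _
  have hb : (spN ws)[i + 1] ∈ spN ws := List.getElem_mem _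
  have halen : (spN ws)[i]'(by omega) < ws.length := ((mem_spN ws _).1 ha).1
  have hblen : (spN ws)[i + 1] < ws.length := ((mem_spN ws _).1 hb).1
  have hab : (spN ws)[i]'(by omega) < (spN ws)[i + 1] := spN_lt ws (by omega) hi
  set a := (spN ws)[i]'(by omega) with hadef
  set b := (spN ws)[i + 1] with hbdef
  have hsplit : ws.take b = ws.take (a + 1) ++ (ws.drop (a + 1)).take (b - (a + 1)) := by
    rw [← List.take_add]
    congr 1
    omega
  rw [hsplit, lastPref_append]
  rw [lastPref_trivial _ _ ?htriv]
  case htriv =>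
    intro w hw
    rcases List.mem_iff_getElem.1 hw with ⟨m, hm, rfl⟩
    rw [List.getElem_take, List.getElem_drop]
    by_contra hnt
    have hmlt : m < b - (a + 1) := by
      have := hm; rw [List.length_take] at this; omega
    have hml : a + 1 + m < ws.length := by
      have := hm; rw [List.length_take, List.length_drop] at this; omega
    have hmem : a + 1 + m ∈ spN ws := by
      rw [mem_spN]
      refine ⟨hml, ?_⟩
      rw [List.getD_eq_getElem ws "" hml]
      simpa using hnt
    rcases spN_mem_index ws hmem with ⟨j, hj, hjm⟩
    have h1 : i < j := spN_index_lt ws (by omega) hj (by omega)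
    have h2 : j < i + 1 := spN_index_lt ws hj hi (by omega)
    omega
  rw [List.take_succ_eq_append_getElem halen, lastPref_append,
    List.getD_eq_getElem ws "" halen]
  have hsp : isTrivial (ws[a]) = false := by
    have := ((mem_spN ws _).1 ha).2
    rwa [List.getD_eq_getElem ws "" halen] at this
  simp [lastPref, hsp]

theorem lastPref_eq_last (ws : List String) (pp : List Char) (hn : 0 < (spN ws).length) :
    lastPref pp ws
      = pref (ws.getD ((spN ws)[(spN ws).length - 1]'(by omega)) "") := by
  have ha : (spN ws)[(spN ws).length - 1]'(by omega) ∈ spN ws := List.getElem_mem _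
  have halen : (spN ws)[(spN ws).length - 1]'(by omega) < ws.length := ((mem_spN ws _).1 ha).1
  set a := (spN ws)[(spN ws).length - 1]'(by omega) with hadef
  conv_lhs => rw [← List.take_append_drop (a + 1) ws]
  rw [lastPref_append]
  rw [lastPref_trivial _ _ ?htriv]
  case htriv =>
    intro w hw
    rcases List.mem_iff_getElem.1 hw with ⟨m, hm, rfl⟩
    rw [List.getElem_drop]
    by_contra hnt
    have hml : a + 1 + m < ws.length := by
      have := hm; rw [List.length_drop] at this; omega
    have hmem : a + 1 + m ∈ spN ws := by
      rw [mem_spN]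
      refine ⟨hml, ?_⟩
      rw [List.getD_eq_getElem ws "" hml]
      simpa using hnt
    rcases spN_mem_index ws hmem with ⟨j, hj, hjm⟩
    have h1 : (spN ws).length - 1 < j := spN_index_lt ws (by omega) hj (by omega)
    omega
  rw [List.take_succ_eq_append_getElem halen, lastPref_append,
    List.getD_eq_getElem ws "" halen]
  have hsp : isTrivial (ws[a]) = false := by
    have := ((mem_spN ws _).1 ha).2
    rwa [List.getD_eq_getElem ws "" halen] at this
  simp [lastPref, hsp]

-- ===== A side: the fold of sets equals the rewrite pass =====

def valA (ws : List String) (sp : List Int) (p : Int × Int) : String :=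
  String.ofList
    ((ws.getD (sp.getD (PySem.Int.mod (p.1 - 1 + (sp.length : Int)) (sp.length : Int)).toNat 0).toNat "").toList.take
        (gplN (ws.getD (sp.getD (PySem.Int.mod (p.1 - 1 + (sp.length : Int)) (sp.length : Int)).toNat 0).toNat ""))
      ++ (ws.getD p.2.toNat "").toList.drop (gplN (ws.getD p.2.toNat "")))

theorem valA_mk (ws : List String) (sp : List Int) (a b : Int) :
    valA ws sp (a, b) = String.ofList
      ((ws.getD (sp.getD (PySem.Int.mod (a - 1 + (sp.length : Int)) (sp.length : Int)).toNat 0).toNat "").toList.take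
          (gplN (ws.getD (sp.getD (PySem.Int.mod (a - 1 + (sp.length : Int)) (sp.length : Int)).toNat 0).toNat ""))
        ++ (ws.getD b.toNat "").toList.drop (gplN (ws.getD b.toNat ""))) := rfl

def astep (ws : List String) (sp : List Int) (acc : List String) (p : Int × Int) : List String :=
  acc.set p.2.toNat (valA ws sp p)

def A_expr (phrase : String) : String :=
  let split := (PySem.Str.split? phrase " ").getD []
  let specialIdxs := ((PySem.List.enumerate split).filter (fun p => ! isTrivial p.2)).map (·.1)
  if specialIdxs.length < 2 then phrase
  else PySem.Str.join " " ((PySem.List.enumerate specialIdxs).foldl (astep split specialIdxs) split)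

theorem A_fold_eq_rew (ws : List String) (hn : 2 ≤ (spN ws).length) :
    (PySem.List.enumerate (spZ ws)).foldl (astep ws (spZ ws)) ws
      = rew (pref (ws.getD ((spN ws)[(spN ws).length - 1]'(by omega)) "")) ws := by
  set sp := spZ ws with hsp
  set LP := pref (ws.getD ((spN ws)[(spN ws).length - 1]'(by omega)) "") with hLP
  have hsplen : sp.length = (spN ws).length := by rw [hsp, spZ, List.length_map]
  have hnodup : ((PySem.List.enumerate sp).map (fun p => p.2.toNat)).Nodup := by
    have h1 : (PySem.List.enumerate sp).map (fun p => p.2.toNat)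
        = ((PySem.List.enumerate sp).map (·.2)).map (fun x => x.toNat) := by
      rw [List.map_map]; rfl
    rw [h1, PySem.List.map_snd_enumerate, hsp, spZ, List.map_map]
    have : ((fun x : Int => x.toNat) ∘ fun k : Nat => (k : Int)) = id := by
      funext k; simp
    rw [this, List.map_id]
    exact nodup_spN ws
  apply List.ext_getElem?
  intro k
  have hFlen : ((PySem.List.enumerate sp).foldl (astep ws sp) ws).length = ws.length :=
    foldl_set_length (PySem.List.enumerate sp) (fun p => p.2.toNat) (valA ws sp) ws
  by_cases hk : k < ws.length
  · by_cases htr : isTrivial (ws[k]'hk)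
    · -- untouched position
      have huntouched : ∀ p ∈ PySem.List.enumerate sp, p.2.toNat ≠ k := by
        intro p hp he
        rcases (PySem.List.mem_enumerate_iff sp 0 p).1 hp with ⟨m, hm, rfl⟩
        have hm' : m < (spN ws).length := by omega
        have h2 : ((spN ws)[m]'hm' : Int).toNat = k := by
          have : sp[m]'(by omega) = ((spN ws)[m]'hm' : Int) := by
            simp [hsp, spZ]
          simpa [this] using he
        have hkm : (spN ws)[m]'hm' = k := by omega
        have := ((mem_spN ws k).1 (hkm ▸ List.getElem_mem hm')).2
        rw [List.getD_eq_getElem ws "" hk] at this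
        rw [this] at htr
        exact Bool.noConfusion htr
      have hF : ((PySem.List.enumerate sp).foldl (astep ws sp) ws)[k]? = ws[k]? :=
        foldl_set_untouched (PySem.List.enumerate sp) (fun p => p.2.toNat) (valA ws sp) ws k huntouched
      rw [hF]
      have hkr : k < (rew LP ws).length := by rw [length_rew]; exact hk
      rw [List.getElem?_eq_getElem hk, List.getElem?_eq_getElem hkr, rew_getElem LP ws k hk,
        if_pos htr]
    · -- special position: k = (spN ws)[i]
      have hkm : k ∈ spN ws := by
        rw [mem_spN]
        exact ⟨hk, by rw [List.getD_eq_getElem ws "" hk]; simpa using htr⟩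
      rcases spN_mem_index ws hkm with ⟨i, hi, hik⟩
      have hilt : i < sp.length := by omega
      have hpel : (PySem.List.enumerate sp)[i]'(by rw [PySem.List.length_enumerate]; omega)
          = ((0 : Int) + i, sp[i]'hilt) := PySem.List.getElem_enumerate ..
      have hpmem : ((0 : Int) + i, sp[i]'hilt) ∈ PySem.List.enumerate sp := by
        rw [← hpel]; exact List.getElem_mem _
      have hspi : sp[i]'hilt = ((spN ws)[i]'(by omega) : Int) := by simp [hsp, spZ]
      have hidxp : (( (0 : Int) + i, sp[i]'hilt) : Int × Int).2.toNat = k := by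
        simp [hspi, hik]
      have hF : ((PySem.List.enumerate sp).foldl (astep ws sp) ws)[k]? = some (valA ws sp ((0 : Int) + i, sp[i]'hilt)) := by
        have h2 := foldl_set_hit (PySem.List.enumerate sp) (fun p => p.2.toNat) (valA ws sp) ws
          ((0 : Int) + i, sp[i]'hilt) hpmem hnodup (by simpa [hidxp] using hk)
        simpa [hidxp] using h2
      rw [hF]
      have hkr : k < (rew LP ws).length := by rw [length_rew]; exact hk
      rw [List.getElem?_eq_getElem hkr, rew_getElem LP ws k hk, if_neg (by simpa using htr)]
      -- compute the modular previous index
      have hnpos : (0 : Int) < (sp.length : Int) := by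
        have h2 : 2 ≤ sp.length := by omega
        exact_mod_cast by omega
      have hval : valA ws sp ((0 : Int) + i, sp[i]'hilt)
          = String.ofList (lastPref LP (ws.take k) ++ stemC (ws[k]'hk)) := by
        have hgd : ws.getD ((sp[i]'hilt).toNat) "" = ws[k]'hk := by
          rw [hspi]
          rw [show (((spN ws)[i]'(by omega) : Int)).toNat = (spN ws)[i]'(by omega) by omega, hik]
          exact List.getD_eq_getElem ws "" hk
        rcases Nat.eq_zero_or_pos i with rfl | hipos
        · -- i = 0 : previous index is n - 1
          have hmod : PySem.Int.mod ((0 : Int) + ((0 : Nat) : Int) - 1 + (sp.length : Int)) (sp.length : Int)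
              = ((sp.length - 1 : Nat) : Int) := by
            rw [PySem.Int.mod_eq_emod_of_pos hnpos]
            rw [Int.emod_eq_of_lt (by push_cast; omega) (by push_cast; omega)]
            push_cast; omega
          have hprev : sp.getD (PySem.Int.mod ((0 : Int) + ((0 : Nat) : Int) - 1 + (sp.length : Int)) (sp.length : Int)).toNat 0
              = ((spN ws)[(spN ws).length - 1]'(by omega) : Int) := by
            rw [hmod]
            have hlt : sp.length - 1 < sp.length := by omega
            rw [show (((sp.length - 1 : Nat) : Int)).toNat = sp.length - 1 by omega]
            rw [List.getD_eq_getElem sp 0 hlt]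
            simp [hsp, spZ]
          have hlpf : lastPref LP (ws.take k) = LP := by
            rw [show k = (spN ws)[0]'(by omega) from hik.symm]
            exact lastPref_take_first ws LP (by omega)
          rw [valA_mk, hprev, hgd, hlpf]
          rw [show (((spN ws)[(spN ws).length - 1]'(by omega) : Int)).toNat = (spN ws)[(spN ws).length - 1]'(by omega) by omega]
          rfl
        · -- i ≥ 1 : previous index is i - 1
          obtain ⟨j, rfl⟩ : ∃ j, i = j + 1 := ⟨i - 1, by omega⟩
          have hmod : PySem.Int.mod ((0 : Int) + ((j + 1 : Nat) : Int) - 1 + (sp.length : Int)) (sp.length : Int)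
              = ((j : Nat) : Int) := by
            rw [PySem.Int.mod_eq_emod_of_pos hnpos]
            rw [show ((0 : Int) + ((j + 1 : Nat) : Int) - 1 + (sp.length : Int)) = (((j + 1 : Nat) : Int) - 1) + (sp.length : Int) by ring]
            rw [Int.add_emod_right]
            rw [Int.emod_eq_of_lt (by push_cast; omega) (by push_cast; omega)]
            push_cast; omega
          have hprev : sp.getD (PySem.Int.mod ((0 : Int) + ((j + 1 : Nat) : Int) - 1 + (sp.length : Int)) (sp.length : Int)).toNat 0
              = ((spN ws)[j]'(by omega) : Int) := by
            rw [hmod]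
            have hlt : j < sp.length := by omega
            rw [show (((j : Nat) : Int)).toNat = j by omega]
            rw [List.getD_eq_getElem sp 0 hlt]
            simp [hsp, spZ]
          have hlps : lastPref LP (ws.take k) = pref (ws.getD ((spN ws)[j]'(by omega)) "") := by
            rw [show k = (spN ws)[j + 1]'(by omega) from hik.symm]
            exact lastPref_take_succ ws LP j (by omega)
          rw [valA_mk, hprev, hgd, hlps]
          rw [show (((spN ws)[j]'(by omega) : Int)).toNat = (spN ws)[j]'(by omega) by omega]
          rfl
      rw [hval]
  · -- out of range: both none
    rw [List.getElem?_eq_none (by omega : ((PySem.List.enumerate sp).foldl (astep ws sp) ws).length ≤ k)]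
    rw [List.getElem?_eq_none (by rw [length_rew]; omega)]

-- ===== B side: the streaming fold =====

def bstep (s : List String × Option (List Char) × Option Nat × List Char) (w : String) :
    List String × Option (List Char) × Option Nat × List Char :=
  if isTrivial w then (s.1 ++ [w], s.2)
  else
    let p := gplN w
    match s.2.1 with
    | none => (s.1 ++ [w], some (w.toList.take p), some s.1.length, w.toList.drop p)
    | some carried =>
        (s.1 ++ [String.ofList (carried ++ w.toList.drop p)],
         some (w.toList.take p), s.2.2.1, s.2.2.2)

def B_expr (phrase : String) : String :=
  let words := (PySem.Str.split? phrase " ").getD []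
  if words.foldl (fun (c : Int) w => if ! isTrivial w then c + 1 else c) 0 < 2 then phrase
  else
    let fin := words.foldl bstep ([], none, none, [])
    match fin.2.1, fin.2.2.1 with
    | some carried, some fp =>
        PySem.Str.join " " (fin.1.set fp (String.ofList (carried ++ fin.2.2.2)))
    | _, _ => phrase

theorem foldl_bstep_some (xs : List String) :
    ∀ (out : List String) (pp : List Char) (fp : Option Nat) (fs : List Char),
    xs.foldl bstep (out, some pp, fp, fs) = (out ++ rew pp xs, some (lastPref pp xs), fp, fs) := by
  induction xs with
  | nil => intro out pp fp fs; simp [rew, lastPref]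
  | cons w xs ih =>
      intro out pp fp fs
      by_cases hw : isTrivial w
      · rw [List.foldl_cons,
          show bstep (out, some pp, fp, fs) w = (out ++ [w], some pp, fp, fs) from by
            simp [bstep, hw],
          ih]
        simp [rew, hw, lastPref, List.foldl_cons]
      · rw [List.foldl_cons,
          show bstep (out, some pp, fp, fs) w
              = (out ++ [String.ofList (pp ++ stemC w)], some (pref w), fp, fs) from by
            simp [bstep, hw, pref, stemC],
          ih]
        simp [rew, hw, lastPref, List.foldl_cons, pref, stemC]

theorem foldl_bstep_none_spec (t : List String) :
    ∀ (w : String) (r out : List String),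
    (∀ u ∈ t, isTrivial u = true) → isTrivial w = false →
    (t ++ w :: r).foldl bstep (out, none, none, []) =
      (out ++ t ++ w :: rew (pref w) r, some (lastPref (pref w) r),
       some (out.length + t.length), stemC w) := by
  induction t with
  | nil =>
      intro w r out _ hw
      rw [List.nil_append, List.foldl_cons,
        show bstep (out, none, none, ([] : List Char)) w
            = (out ++ [w], some (pref w), some out.length, stemC w) from by
          simp [bstep, hw, pref, stemC],
        foldl_bstep_some]
      simp
  | cons u t ih =>
      intro w r out ht hw
      have hu : isTrivial u = true := ht u (by simp)
      rw [List.cons_append, List.foldl_cons,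
        show bstep (out, none, none, ([] : List Char)) u = (out ++ [u], none, none, []) from by
          simp [bstep, hu],
        ih w r (out ++ [u]) (fun v hv => ht v (by simp [hv])) hw]
      simp
      omega

-- ===== assembling both sides =====

theorem transform_eq_alt (phrase : String) : transform phrase = transform_alt phrase := by
  have hA : transform phrase = A_expr phrase := rfl
  have hB : transform_alt phrase = B_expr phrase := rfl
  set ws := (PySem.Str.split? phrase " ").getD [] with hws
  have hA2 : A_expr phrase
      = (if (((PySem.List.enumerate ws).filter (fun p => ! isTrivial p.2)).map (·.1)).length < 2
         then phrase
         else PySem.Str.join " "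
           ((PySem.List.enumerate (((PySem.List.enumerate ws).filter (fun p => ! isTrivial p.2)).map (·.1))).foldl
             (astep ws (((PySem.List.enumerate ws).filter (fun p => ! isTrivial p.2)).map (·.1))) ws)) := rfl
  have hB2 : B_expr phrase
      = (if ws.foldl (fun (c : Int) w => if ! isTrivial w then c + 1 else c) 0 < 2
         then phrase
         else
           (match (ws.foldl bstep ([], none, none, [])).2.1, (ws.foldl bstep ([], none, none, [])).2.2.1 with
            | some carried, some fp =>
                PySem.Str.join " " ((ws.foldl bstep ([], none, none, [])).1.set fp
                  (String.ofList (carried ++ (ws.foldl bstep ([], none, none, [])).2.2.2)))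
            | _, _ => phrase)) := rfl
  rw [hA, hB, hA2, hB2, spA_eq ws]
  rw [PySem.List.foldl_if_add_one (fun w => ! isTrivial w) ws 0]
  rw [show (spZ ws).length = (spN ws).length from by rw [spZ, List.length_map]]
  by_cases hc : (spN ws).length < 2
  · rw [if_pos hc, if_pos (by rw [← length_spN]; omega)]
  · rw [if_neg hc, if_neg (by rw [← length_spN]; omega)]
    -- decompose ws at its first special word
    have hsp0 : 0 < (spN ws).length := by omega
    have hdw : ws.dropWhile isTrivial ≠ [] := by
      intro hnil
      have hall := List.dropWhile_eq_nil_iff.1 hnil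
      have hmem : (spN ws)[0]'hsp0 ∈ spN ws := List.getElem_mem _
      rcases (mem_spN ws _).1 hmem with ⟨hlt, hspec⟩
      have : isTrivial (ws[(spN ws)[0]'hsp0]'hlt) = true := hall _ (List.getElem_mem _)
      rw [List.getD_eq_getElem ws "" hlt] at hspec
      rw [hspec] at this
      exact Bool.noConfusion this
    set w := (ws.dropWhile isTrivial).head hdw with hwdef
    set r := (ws.dropWhile isTrivial).tail with hrdef
    set t := ws.takeWhile isTrivial with htdef
    have hcons : w :: r = ws.dropWhile isTrivial := by
      rw [hwdef, hrdef]
      exact List.cons_head?_tail (Option.mem_def.mpr (List.head?_eq_some_head hdw))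
    have hdecomp : ws = t ++ w :: r := by
      rw [htdef, hcons, List.takeWhile_append_dropWhile]
    have hw : isTrivial w = false := List.head_dropWhile_not isTrivial hdw
    have ht : ∀ u ∈ t, isTrivial u = true := fun u hu => List.mem_takeWhile_imp hu
    -- evaluate B's fold
    have hfold : ws.foldl bstep ([], none, none, []) =
        (t ++ w :: rew (pref w) r, some (lastPref (pref w) r), some t.length, stemC w) := by
      conv_lhs => rw [hdecomp]
      rw [foldl_bstep_none_spec t w r [] ht hw]
      simp
    rw [hfold]
    -- B returns the rewrite with the carried last prefix
    have hset : (t ++ w :: rew (pref w) r).set t.length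
        (String.ofList (lastPref (pref w) r ++ stemC w))
        = t ++ String.ofList (lastPref (pref w) r ++ stemC w) :: rew (pref w) r := by
      rw [show (t ++ w :: rew (pref w) r).set t.length (String.ofList (lastPref (pref w) r ++ stemC w))
          = t ++ (w :: rew (pref w) r).set 0 (String.ofList (lastPref (pref w) r ++ stemC w)) from by
        simp]
      rfl
    show PySem.Str.join " " ((PySem.List.enumerate (spZ ws)).foldl (astep ws (spZ ws)) ws)
        = PySem.Str.join " " ((t ++ w :: rew (pref w) r).set t.length
            (String.ofList (lastPref (pref w) r ++ stemC w)))
    rw [hset, A_fold_eq_rew ws (by omega)]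
    congr 1
    have hLPB : lastPref (pref w) r = lastPref ([] : List Char) ws := by
      conv_rhs => rw [hdecomp]
      rw [lastPref_append, lastPref_trivial _ _ ht]
      simp [lastPref, hw]
    have hLPA : pref (ws.getD ((spN ws)[(spN ws).length - 1]'(by omega)) "")
        = lastPref ([] : List Char) ws := (lastPref_eq_last ws [] (by omega)).symm
    rw [hLPA, ← hLPB]
    conv_lhs => rw [hdecomp]
    rw [rew_trivial_append _ _ _ ht]
    simp [rew, hw]

-- ===== VERDICT (by name: the statement is the Claim_ definition above) =====
theorem transform_spec : Claim_equal_transform := by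
  intro phrase _ _
  unfold Spec_transform
  exact transform_eq_alt phrase
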